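-- pv_equiv track=rewrite | github.com/FaramirDev/PythonLabs | 05_TP_Analyseur_Texte/main_analyseur_texte.py | calcul_frequence
-- ===== SOURCE A (Python) =====
-- list_alphabet = ['a', 'b', 'c', 'd', 'e', 'f', 'g', 'h', 'i', 'j', 'k', 'l', 'm', 'n', 'o', 'p', 'q', 'r', 's', 't', 'u', 'v', 'w', 'x', 'y', 'z', "*"]
--
-- def calcul_frequence(user_input):
--     nb_mot = user_input.lower()
--     nb_mot = nb_mot.replace(" ","*")
--     nb_mot = nb_mot.split()
--
--     data_alphabet = {}
--
--     list_mot = list(nb_mot)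
--
--     for mot in list_mot:
--         for alphabet in list_alphabet:
--             recup_count = mot.count(alphabet)
--             if recup_count > 0 and alphabet!= "*":
--                 data_alphabet[alphabet] = recup_count
--
--     return data_alphabet
-- ===== SOURCE B (Python) =====
-- def calcul_frequence(user_input):
--     result = {}
--     for mot in user_input.lower().replace(" ", "*").split():
--         compte = {}
--         for ch in mot:
--             compte[ch] = compte.get(ch, 0) + 1
--         for ch in sorted(compte):
--             if 'a' <= ch <= 'z':
--                 result[ch] = compte[ch]
--     return result
-- ===== Notes on version B (the rewrite author's own statement) =====
-- stated objective: idiomatic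
-- what changed: Replaces the fixed 27-iteration inner loop of mot.count scans per token by a single counting pass over each token's characters into a dict, then emits the present letters in sorted order filtered to the lowercase alphabet range.
import Mathlib
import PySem

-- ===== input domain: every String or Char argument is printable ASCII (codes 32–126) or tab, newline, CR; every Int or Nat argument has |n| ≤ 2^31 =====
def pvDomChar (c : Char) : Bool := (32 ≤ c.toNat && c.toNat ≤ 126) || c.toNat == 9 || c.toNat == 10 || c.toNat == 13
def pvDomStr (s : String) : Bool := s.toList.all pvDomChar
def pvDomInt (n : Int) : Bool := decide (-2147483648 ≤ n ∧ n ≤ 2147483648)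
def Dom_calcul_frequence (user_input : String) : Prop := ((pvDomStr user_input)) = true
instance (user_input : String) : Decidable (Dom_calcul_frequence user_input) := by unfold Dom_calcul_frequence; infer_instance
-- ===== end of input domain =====

-- B replaces A's fixed 27-scan inner loop (mot.count per alphabet letter) by one counting
-- pass over each token's characters, emitting the present lowercase-alphabet letters in sorted order.

-- ===== PORT A =====
def list_alphabet : List String :=
  ["a", "b", "c", "d", "e", "f", "g", "h", "i", "j", "k", "l", "m", "n", "o", "p", "q",
   "r", "s", "t", "u", "v", "w", "x", "y", "z", "*"]

def calcul_frequence (user_input : String) : List (String × Int) :=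
  let nb_mot := PySem.Str.lower user_input
  let nb_mot := PySem.Str.replace nb_mot " " "*"
  let nb_mot := PySem.Str.split₀ nb_mot
  let list_mot := nb_mot
  (list_mot.foldl
    (fun (data_alphabet : PySem.Dict String Int) mot =>
      list_alphabet.foldl
        (fun data_alphabet alphabet =>
          let recup_count : Int := (PySem.Str.count mot alphabet : Int)
          if recup_count > 0 ∧ alphabet ≠ "*" then data_alphabet.insert alphabet recup_count
          else data_alphabet)
        data_alphabet)
    PySem.Dict.empty).items

-- ===== PORT B =====
def calcul_frequence_alt (user_input : String) : List (String × Int) :=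
  ((PySem.Str.split₀ (PySem.Str.replace (PySem.Str.lower user_input) " " "*")).foldl
    (fun (result : PySem.Dict String Int) mot =>
      let compte : PySem.Dict Char Int :=
        mot.toList.foldl (fun d ch => d.insert ch (d.getD ch 0 + 1)) PySem.Dict.empty
      (PySem.List.sorted compte.keys (fun k => k)).foldl
        (fun result ch =>
          if 'a' ≤ ch ∧ ch ≤ 'z' then result.insert (String.ofList [ch]) (compte.getD ch 0)
          else result)
        result)
    PySem.Dict.empty).items

-- ===== PRECONDITION & SPEC =====
def Spec_calcul_frequence (user_input : String) (out : List (String × Int)) : Prop := out = calcul_frequence_alt user_input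
instance (user_input : String) (out : List (String × Int)) : Decidable (Spec_calcul_frequence user_input out) := by unfold Spec_calcul_frequence; infer_instance

-- ===== CLAIM (what is proved, stated in full; the proofs are below) =====
def Claim_equal_calcul_frequence : Prop := ∀ (user_input : String), Dom_calcul_frequence user_input → Spec_calcul_frequence user_input (calcul_frequence user_input)

-- ===== LEMMAS AND PROOFS =====

-- the 26 lowercase letters as characters
def azChars : List Char :=
  ['a', 'b', 'c', 'd', 'e', 'f', 'g', 'h', 'i', 'j', 'k', 'l', 'm', 'n', 'o', 'p', 'q',
   'r', 's', 't', 'u', 'v', 'w', 'x', 'y', 'z']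

lemma list_alphabet_eq : list_alphabet = azChars.map (fun c => String.ofList [c]) ++ ["*"] := by
  decide

lemma mem_azChars (c : Char) : c ∈ azChars ↔ ('a' ≤ c ∧ c ≤ 'z') := by
  constructor
  · intro h
    fin_cases h <;> exact ⟨by decide, by decide⟩
  · rintro ⟨h1, h2⟩
    have hlo : 97 ≤ c.toNat := h1
    have hhi : c.toNat ≤ 122 := h2
    have hc : Char.ofNat c.toNat = c := Char.ofNat_toNat c
    set n := c.toNat with hn
    rw [← hc]
    interval_cases n <;> decide

-- counting a single character as a substring is List.count
lemma count_go_single (c : Char) :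
    ∀ (fuel : Nat) (l : List Char) (acc : Nat), l.length ≤ fuel →
      PySem.Chars.count.go [c] fuel l acc = acc + l.count c := by
  intro fuel
  induction fuel with
  | zero =>
    intro l acc h
    have : l = [] := List.eq_nil_of_length_eq_zero (Nat.le_zero.mp h)
    subst this; simp [PySem.Chars.count.go]
  | succ n ih =>
    intro l acc h
    cases l with
    | nil => simp [PySem.Chars.count.go]
    | cons x t =>
      by_cases hx : c = x
      · subst hx
        have : [c].isPrefixOf (c :: t) = true := by simp [List.isPrefixOf]
        simp only [PySem.Chars.count.go, this, if_pos]
        rw [show List.drop [c].length (c :: t) = t from rfl]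
        rw [ih t (acc + 1) (by simpa using Nat.lt_succ_iff.mp (Nat.lt_of_lt_of_le (Nat.lt_succ_self _) h))]
        simp
        omega
      · have : [c].isPrefixOf (x :: t) = false := by
          simp [List.isPrefixOf]
          exact fun hxx => hx hxx
        simp only [PySem.Chars.count.go, this, if_neg, Bool.false_eq_true, not_false_iff]
        rw [ih t acc (by simpa using Nat.succ_le_succ_iff.mp h)]
        simp [Ne.symm hx]

lemma count_single (mot : String) (c : Char) :
    PySem.Str.count mot (String.ofList [c]) = mot.toList.count c := by
  rw [PySem.Str.count_eq]
  have h1 : (String.ofList [c]).toList = [c] := by simp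
  rw [h1]
  unfold PySem.Chars.count
  rw [if_neg (by simp)]
  rw [count_go_single c mot.toList.length mot.toList 0 le_rfl]
  simp

-- the filtered letter lists agree: sorted distinct chars of cs kept in 'a'..'z'
-- = alphabet letters occurring in cs
lemma filtered_lists_eq (cs : List Char) :
    (PySem.List.sorted (PySem.Set.ofList cs) (fun k => k)).filter
        (fun c => decide ('a' ≤ c ∧ c ≤ 'z'))
      = azChars.filter (fun c => decide ((cs.count c : Int) > 0 ∧ String.ofList [c] ≠ "*")) := by
  have hpwB : ((PySem.List.sorted (PySem.Set.ofList cs) (fun k => k)).filter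
      (fun c => decide ('a' ≤ c ∧ c ≤ 'z'))).Pairwise (· < ·) :=
    (PySem.List.sorted_ofList_pairwise_lt cs).filter _
  have hpwA : (azChars.filter
      (fun c => decide ((cs.count c : Int) > 0 ∧ String.ofList [c] ≠ "*"))).Pairwise (· < ·) := by
    have : azChars.Pairwise (· < ·) := by decide
    exact this.filter _
  have hmem : ∀ c : Char,
      c ∈ (PySem.List.sorted (PySem.Set.ofList cs) (fun k => k)).filter
            (fun c => decide ('a' ≤ c ∧ c ≤ 'z'))
        ↔ c ∈ azChars.filter (fun c => decide ((cs.count c : Int) > 0 ∧ String.ofList [c] ≠ "*")) := by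
    intro c
    simp only [List.mem_filter, PySem.List.mem_sorted, PySem.Set.mem_ofList, decide_eq_true_eq,
      mem_azChars]
    constructor
    · rintro ⟨hc, haz⟩
      refine ⟨haz, ?_, ?_⟩
      · have := List.count_pos_iff.mpr hc
        exact_mod_cast this
      · intro hstar
        have : c = '*' := by
          have := congrArg String.toList hstar
          simpa using this
        subst this
        exact absurd haz.1 (by decide)
    · rintro ⟨haz, hcnt, _⟩
      refine ⟨?_, haz⟩
      have : 0 < cs.count c := by exact_mod_cast hcnt
      exact List.count_pos_iff.mp this
  have hperm : ((PySem.List.sorted (PySem.Set.ofList cs) (fun k => k)).filter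
        (fun c => decide ('a' ≤ c ∧ c ≤ 'z'))).Perm
      (azChars.filter (fun c => decide ((cs.count c : Int) > 0 ∧ String.ofList [c] ≠ "*"))) :=
    (List.perm_ext_iff_of_nodup (hpwB.imp ne_of_lt) (hpwA.imp ne_of_lt)).mpr hmem
  exact List.Perm.eq_of_pairwise (fun a b _ _ hab hba => le_antisymm hab hba)
    (hpwB.imp le_of_lt) (hpwA.imp le_of_lt) hperm

-- per-token: A's 27-scan inner loop equals B's count-then-sorted-emit inner loop
lemma inner_eq (mot : String) (d : PySem.Dict String Int) :
    list_alphabet.foldl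
      (fun data alphabet =>
        let recup_count : Int := (PySem.Str.count mot alphabet : Int)
        if recup_count > 0 ∧ alphabet ≠ "*" then data.insert alphabet recup_count else data)
      d
    = (PySem.List.sorted ((PySem.Dict.counter mot.toList).keys) (fun k => k)).foldl
        (fun result ch =>
          if 'a' ≤ ch ∧ ch ≤ 'z' then
            result.insert (String.ofList [ch]) ((PySem.Dict.counter mot.toList).getD ch 0)
          else result)
        d := by
  -- B side: the counter's keys are the distinct chars in first-occurrence order
  rw [PySem.Dict.keys_counter]
  have hBval : (PySem.List.sorted (PySem.Set.ofList mot.toList) (fun k => k)).foldl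
      (fun result ch =>
        if 'a' ≤ ch ∧ ch ≤ 'z' then
          result.insert (String.ofList [ch]) ((PySem.Dict.counter mot.toList).getD ch 0)
        else result) d
      = ((PySem.List.sorted (PySem.Set.ofList mot.toList) (fun k => k)).filter
          (fun c => decide ('a' ≤ c ∧ c ≤ 'z'))).foldl
          (fun result ch => result.insert (String.ofList [ch]) ((mot.toList.count ch : Int))) d := by
    rw [PySem.List.foldl_ite_eq_foldl_filter (fun ch => 'a' ≤ ch ∧ ch ≤ 'z')
      (fun (result : PySem.Dict String Int) ch =>
        result.insert (String.ofList [ch]) ((PySem.Dict.counter mot.toList).getD ch 0))]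
    refine PySem.List.foldl_congr_mem _ _ _ _ ?_
    intro acc x hx
    rw [PySem.Dict.getD_counter]
  rw [hBval]
  -- A side: split off '*', pull the map out, reduce to the same filtered fold
  rw [list_alphabet_eq, List.foldl_append, List.foldl_map]
  have hstar : ∀ (d' : PySem.Dict String Int),
      (["*"].foldl (fun data alphabet =>
        let recup_count : Int := (PySem.Str.count mot alphabet : Int)
        if recup_count > 0 ∧ alphabet ≠ "*" then data.insert alphabet recup_count else data) d') = d' := by
    intro d'; simp
  rw [hstar]
  rw [PySem.List.foldl_ite_eq_foldl_filter
    (fun c => ((PySem.Str.count mot (String.ofList [c]) : Int) > 0 ∧ String.ofList [c] ≠ "*"))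
    (fun (data : PySem.Dict String Int) c =>
      data.insert (String.ofList [c]) ((PySem.Str.count mot (String.ofList [c]) : Int)))]
  have hcnt : ∀ c : Char, PySem.Str.count mot (String.ofList [c]) = mot.toList.count c :=
    fun c => count_single mot c
  simp only [hcnt]
  rw [filtered_lists_eq mot.toList]

-- ===== VERDICT (by name: the statement is the Claim_ definition above) =====
theorem calcul_frequence_spec : Claim_equal_calcul_frequence := by
  intro user_input _
  unfold Spec_calcul_frequence calcul_frequence calcul_frequence_alt
  refine congrArg PySem.Dict.items ?_
  refine PySem.List.foldl_congr_mem _ _ _ _ ?_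
  intro acc mot _
  simp only [PySem.Dict.foldl_insert_getD_add_one_eq_counter]
  exact inner_eq mot acc
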